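-- pv_equiv track=rewrite | github.com/mikan-sakura/DCGAT | dataloader_utils.py | mark_entity
-- ===== SOURCE A (Python) =====
-- from typing import List, Dict, Tuple
--
-- def find_head_idx(source: List[str], target: List[str]) -> int:
--     """Improved entity head index finding with fuzzy matching"""
--     target_len = len(target)
--     if target_len == 0:
--         return -1
--
--     for i in range(len(source)):
--         if source[i:i + target_len] == target:
--             return i
--
--     target_str = ''.join(target).replace('##', '')
--     source_str = ''.join(source).replace('##', '')
--     idx = source_str.find(target_str)
--     if idx != -1:
--         char_count = 0
--         for token_idx, token in enumerate(source):
--             char_count += len(token.replace('##', ''))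
--             if char_count > idx:
--                 return token_idx
--     return -1
--
-- def mark_entity(bio_tags: List[str], entity_tokens: List[str],
--                 all_tokens: List[str], entity_type: str) -> List[str]:
--     """Mark entity positions in BIO tags"""
--     start_idx = find_head_idx(all_tokens, entity_tokens)
--     if start_idx != -1:
--         end_idx = start_idx + len(entity_tokens)
--         if end_idx <= len(bio_tags):
--             bio_tags[start_idx] = f'B-{entity_type}'
--             for i in range(start_idx + 1, end_idx):
--                 bio_tags[i] = f'I-{entity_type}'
--     return bio_tags
-- ===== SOURCE B (Python) =====
-- from typing import List
--
--
-- def _kmp_find(source: List[str], target: List[str]) -> int: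
--     """First token index of target in source via KMP: the failure (border)
--     table is built incrementally in O(m), then one linear left-to-right pass
--     over source with no slicing and no backtracking."""
--     m = len(target)
--     if m == 0:
--         return -1
--     # fail[q] = length of the longest proper border of target[:q]
--     fail = [0, 0]
--     k = 0
--     for q in range(1, m):
--         while k > 0 and target[q] != target[k]:
--             k = fail[k]
--         if target[q] == target[k]:
--             k += 1
--         fail.append(k)
--     q = 0
--     for i, tok in enumerate(source):
--         while q > 0 and tok != target[q]:
--             q = fail[q]
--         if tok == target[q]:
--             q += 1
--         if q == m:
--             return i + 1 - m
--     return -1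
--
--
-- def _find_entity_start(source: List[str], target: List[str]) -> int:
--     start = _kmp_find(source, target)
--     if start != -1:
--         return start
--     if len(target) == 0:
--         return -1
--     tgt = ''.join(target).replace('##', '')
--     src = ''.join(source).replace('##', '')
--     idx = src.find(tgt)
--     if idx == -1:
--         return -1
--     total = 0
--     pos = 0
--     for t in source:
--         total += len(t.replace('##', ''))
--         if total <= idx:
--             pos += 1
--     return pos if pos < len(source) else -1
--
--
-- def mark_entity(bio_tags: List[str], entity_tokens: List[str],
--                 all_tokens: List[str], entity_type: str) -> List[str]:
--     """Mark entity positions in BIO tags"""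
--     start = _find_entity_start(all_tokens, entity_tokens)
--     m = len(entity_tokens)
--     if start != -1 and start + m <= len(bio_tags):
--         bio_tags[start:start + m] = ['B-' + entity_type] + ['I-' + entity_type] * (m - 1)
--     return bio_tags
-- ===== Notes on version B (the rewrite author's own statement) =====
-- stated objective: faster
-- what changed: The exact token search is replaced by a KMP automaton: the failure (border) table is built incrementally over the entity-token pattern and the token list is then scanned in one linear pass with no slicing and no backtracking, instead of A's compare-a-slice-at-every-offset scan; the fuzzy char-hit-to-token mapping is a count of cumulative stripped lengths <= hit instead of A's early-return accumulation loop, and the tags are written by one slice assignment instead of per-index writes.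
import Mathlib
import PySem

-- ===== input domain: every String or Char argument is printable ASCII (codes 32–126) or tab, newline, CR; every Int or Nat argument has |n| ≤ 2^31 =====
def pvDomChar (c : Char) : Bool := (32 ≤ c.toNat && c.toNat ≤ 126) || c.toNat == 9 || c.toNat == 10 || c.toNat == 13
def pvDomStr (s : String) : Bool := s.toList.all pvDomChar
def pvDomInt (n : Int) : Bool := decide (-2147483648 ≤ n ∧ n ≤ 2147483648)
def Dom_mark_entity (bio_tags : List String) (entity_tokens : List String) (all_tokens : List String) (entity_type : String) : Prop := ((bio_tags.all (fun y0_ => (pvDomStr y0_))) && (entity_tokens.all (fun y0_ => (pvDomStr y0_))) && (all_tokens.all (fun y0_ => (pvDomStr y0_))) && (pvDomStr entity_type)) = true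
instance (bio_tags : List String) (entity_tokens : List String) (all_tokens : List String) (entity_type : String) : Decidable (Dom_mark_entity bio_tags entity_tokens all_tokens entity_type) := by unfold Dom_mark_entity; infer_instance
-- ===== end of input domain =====

-- B replaces A's compare-a-slice-at-every-offset token search by a KMP automaton (precomputed border
-- table + one linear pass, no backtracking), the fuzzy char→token mapping by a count of cumulative
-- lengths ≤ hit, and the per-index tag writes by one splice; A mutates bio_tags in place (B's Python
-- mutates it the same way via slice assignment); the equivalence proved here is about the return value.

-- ===== PORT A =====
-- for i in range(len(source)): if source[i:i+target_len] == target: return i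
def findHeadScanA (source target : List String) : List Int → Option Int
  | [] => none
  | i :: rest =>
    if PySem.List.slice source (some i) (some (i + PySem.List.len target)) = target then some i
    else findHeadScanA source target rest

-- for token_idx, token in enumerate(source): char_count += len(token.replace('##','')); if char_count > idx: return token_idx
def findHeadCharScanA (idx : Int) : List String → Nat → Int → Int
  | [], _, _ => -1
  | tok :: rest, ti, cc =>
    let cc2 := cc + PySem.Str.len (PySem.Str.replace tok "##" "")
    if cc2 > idx then (ti : Int) else findHeadCharScanA idx rest (ti + 1) cc2

def find_head_idx (source target : List String) : Int :=
  if PySem.List.len target = 0 then -1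
  else
    match findHeadScanA source target (PySem.List.pyRange 0 (PySem.List.len source) 1) with
    | some i => i
    | none =>
      let target_str := PySem.Str.replace (PySem.Str.join "" target) "##" ""
      let source_str := PySem.Str.replace (PySem.Str.join "" source) "##" ""
      let idx := PySem.Str.find source_str target_str
      if idx ≠ -1 then findHeadCharScanA idx source 0 0 else -1

def mark_entity (bio_tags : List String) (entity_tokens : List String) (all_tokens : List String) (entity_type : String) : List String :=
  let start_idx := find_head_idx all_tokens entity_tokens
  if start_idx ≠ -1 then
    let end_idx := start_idx + PySem.List.len entity_tokens
    if end_idx ≤ PySem.List.len bio_tags then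
      let b1 := PySem.List.pySetD bio_tags start_idx ("B-" ++ entity_type)
      (PySem.List.pyRange (start_idx + 1) end_idx 1).foldl
        (fun b i => PySem.List.pySetD b i ("I-" ++ entity_type)) b1
    else bio_tags
  else bio_tags

-- ===== PORT B =====
-- while k > 0 and c != target[k]: k = fail[k]
-- (ported with an explicit iteration budget = the initial k: the state strictly decreases on every
-- iteration of Python's while, so k iterations always suffice and the port is exact)
def tblShift (t : List String) (fail : List Nat) (c : String) : Nat → Nat → Nat
  | 0, k => k
  | fuel + 1, k =>
    if 0 < k ∧ c ≠ t.getD k "" then tblShift t fail c fuel (fail.getD k 0) else k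

-- one iteration of: while ...; if target[q] == target[k]: k += 1; fail.append(k)
def kmpBuildStep (t : List String) (st : List Nat × Nat) (q : Int) : List Nat × Nat :=
  let c := PySem.List.pyGetD t q ""
  let k1 := tblShift t st.1 c st.2 st.2
  let k2 := if c = t.getD k1 "" then k1 + 1 else k1
  (st.1 ++ [k2], k2)

-- fail = [0, 0]; k = 0; for q in range(1, m): <one build step>
def kmpFail (t : List String) : List Nat :=
  ((PySem.List.pyRange 1 (t.length : Int) 1).foldl (kmpBuildStep t) ([0, 0], 0)).1

-- for i, tok in enumerate(source): <shift>; if tok == target[q]: q += 1; if q == m: return i + 1 - m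
def kmpLoop (t : List String) (fail : List Nat) (m : Nat) : List String → Nat → Nat → Option Nat
  | [], _, _ => none
  | tok :: rest, i, q =>
    let q1 := tblShift t fail tok q q
    let q2 := if tok = t.getD q1 "" then q1 + 1 else q1
    if q2 = m then some (i + 1 - m) else kmpLoop t fail m rest (i + 1) q2

def altFindStart (source target : List String) : Int :=
  if target.length = 0 then -1
  else
    match kmpLoop target (kmpFail target) target.length source 0 0 with
    | some i => (i : Int)
    | none =>
      let tgt := PySem.Str.replace (PySem.Str.join "" target) "##" ""
      let src := PySem.Str.replace (PySem.Str.join "" source) "##" ""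
      let idx := PySem.Str.find src tgt
      if idx = -1 then -1
      else
        let r := source.foldl (fun (p : Int × Int) t =>
            let total := p.1 + PySem.Str.len (PySem.Str.replace t "##" "")
            (total, if total ≤ idx then p.2 + 1 else p.2)) (0, 0)
        if r.2 < PySem.List.len source then r.2 else -1

def mark_entity_alt (bio_tags : List String) (entity_tokens : List String) (all_tokens : List String) (entity_type : String) : List String :=
  let start := altFindStart all_tokens entity_tokens
  let m := entity_tokens.length
  if start ≠ -1 ∧ start + (m : Int) ≤ PySem.List.len bio_tags then
    bio_tags.take start.toNat ++
      ("B-" ++ entity_type) :: (List.replicate (m - 1) ("I-" ++ entity_type) ++ bio_tags.drop (start.toNat + m))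
  else bio_tags

-- ===== PRECONDITION & SPEC =====
def Spec_mark_entity (bio_tags : List String) (entity_tokens : List String) (all_tokens : List String) (entity_type : String) (out : List String) : Prop := out = mark_entity_alt bio_tags entity_tokens all_tokens entity_type
instance (bio_tags : List String) (entity_tokens : List String) (all_tokens : List String) (entity_type : String) (out : List String) : Decidable (Spec_mark_entity bio_tags entity_tokens all_tokens entity_type out) := by unfold Spec_mark_entity; infer_instance

-- ===== CLAIM (what is proved, stated in full; the proofs are below) =====
def Claim_equal_mark_entity : Prop := ∀ (bio_tags : List String) (entity_tokens : List String) (all_tokens : List String) (entity_type : String), Dom_mark_entity bio_tags entity_tokens all_tokens entity_type → Spec_mark_entity bio_tags entity_tokens all_tokens entity_type (mark_entity bio_tags entity_tokens all_tokens entity_type)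

-- ===== LEMMAS AND PROOFS =====

-- generic suffix facts about appending one element
lemma suffix_concat_concat {α : Type} (a x : List α) (c d : α) :
    a ++ [c] <:+ x ++ [d] ↔ c = d ∧ a <:+ x := by
  rw [← List.reverse_prefix]
  simp only [List.reverse_append, List.reverse_singleton, List.singleton_append,
    List.cons_prefix_cons, List.reverse_prefix]

lemma take_concat_getD (t : List String) (k : Nat) (hk : k < t.length) :
    t.take (k + 1) = t.take k ++ [t.getD k ""] := by
  rw [List.take_add_one, List.getElem?_eq_getElem hk, List.getD_eq_getElem t "" hk]
  rfl

-- ---- the automaton state: φ x = length of the longest prefix of t that is a suffix of x ----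
def phi (t x : List String) : Nat := Nat.findGreatest (fun k => t.take k <:+ x) t.length

lemma phi_le (t x : List String) : phi t x ≤ t.length := Nat.findGreatest_le _

lemma phi_suffix (t x : List String) : t.take (phi t x) <:+ x := by
  have h0 : (fun k => t.take k <:+ x) 0 := by simp
  exact Nat.findGreatest_spec (P := fun k => t.take k <:+ x) (Nat.zero_le _) h0

lemma le_phi (t x : List String) (k : Nat) (hk : k ≤ t.length) (h : t.take k <:+ x) :
    k ≤ phi t x := Nat.le_findGreatest hk h

lemma phi_lt_of_not_suffix (t x : List String) (_ht : t ≠ []) (h : ¬ t <:+ x) :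
    phi t x < t.length := by
  rcases Nat.lt_or_ge (phi t x) t.length with h1 | h1
  · exact h1
  · exfalso
    have h2 : phi t x = t.length := le_antisymm (phi_le t x) h1
    have := phi_suffix t x
    rw [h2, List.take_length] at this
    exact h this

lemma phi_nil (t : List String) (ht : t ≠ []) : phi t [] = 0 := by
  have h := phi_suffix t []
  rw [List.suffix_nil] at h
  rcases (List.take_eq_nil_iff).mp h with h1 | h1
  · exact h1
  · exact absurd h1 ht

-- a nonempty prefix of t that is a suffix of x ++ [c] ends in c and drops to a suffix of x
lemma phi_decompose (t x : List String) (c : String) (p : Nat) (hp : 1 ≤ p) (hpm : p ≤ t.length)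
    (h : t.take p <:+ x ++ [c]) : t.getD (p - 1) "" = c ∧ t.take (p - 1) <:+ x := by
  obtain ⟨j, rfl⟩ : ∃ j, p = j + 1 := ⟨p - 1, by omega⟩
  rw [take_concat_getD t j (by omega)] at h
  have := (suffix_concat_concat _ _ _ _).mp h
  simpa using this

-- ---- the longest proper border, and correctness of the incremental failure table ----
def bspec (t : List String) (q : Nat) : Nat :=
  Nat.findGreatest (fun k => t.take k <:+ t.take q) (q - 1)

lemma bspec_le (t : List String) (q : Nat) : bspec t q ≤ q - 1 := Nat.findGreatest_le _

lemma bspec_suffix (t : List String) (q : Nat) : t.take (bspec t q) <:+ t.take q := by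
  have h0 : (fun k => t.take k <:+ t.take q) 0 := by simp
  exact Nat.findGreatest_spec (P := fun k => t.take k <:+ t.take q) (Nat.zero_le _) h0

lemma bspec_greatest (t : List String) (q k : Nat) (hk : k < q) (h : t.take k <:+ t.take q) :
    k ≤ bspec t q := Nat.le_findGreatest (by omega) h

-- the fuel-bounded while loop: generic invariant-preservation (used for both the table build,
-- where x = t.take q, and the text scan, where x is the processed text)
lemma tblShift_spec (t x : List String) (c : String) (fail : List Nat) (B : Nat)
    (hB : B ≤ t.length)
    (Hfail : ∀ j, 1 ≤ j → j < B → fail.getD j 0 = bspec t j) :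
    ∀ k fuel, k ≤ fuel → k < B → t.take k <:+ x →
    (∀ j, j < B → t.take j <:+ x → t.getD j "" = c → j ≤ k) →
    (tblShift t fail c fuel k < B ∧
     t.take (tblShift t fail c fuel k) <:+ x ∧
     (∀ j, j < B → t.take j <:+ x → t.getD j "" = c → j ≤ tblShift t fail c fuel k) ∧
     (tblShift t fail c fuel k = 0 ∨ t.getD (tblShift t fail c fuel k) "" = c)) := by
  intro k
  induction k using Nat.strong_induction_on with
  | _ k ih =>
    intro fuel hfuel hkB hsuf hinv
    cases fuel with
    | zero =>
      have hk0 : k = 0 := by omega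
      subst hk0
      exact ⟨hkB, hsuf, hinv, Or.inl rfl⟩
    | succ f =>
      rw [tblShift]
      by_cases h : 0 < k ∧ c ≠ t.getD k ""
      · rw [if_pos h]
        rw [Hfail k h.1 hkB]
        have hlt : bspec t k < k := by have := bspec_le t k; have := h.1; omega
        refine ih (bspec t k) hlt f (by omega) (by omega)
          (List.IsSuffix.trans (bspec_suffix t k) hsuf) ?_
        intro j hj hjsuf hjc
        have hjk : j ≤ k := hinv j hj hjsuf hjc
        have hjne : j ≠ k := fun hEq => h.2 (by rw [hEq] at hjc; exact hjc.symm)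
        refine bspec_greatest t k j (by omega) ?_
        exact List.suffix_of_suffix_length_le hjsuf hsuf
          (by rw [List.length_take, List.length_take]; omega)
      · rw [if_neg h]
        push Not at h
        refine ⟨hkB, hsuf, hinv, ?_⟩
        rcases Nat.eq_zero_or_pos k with h0 | h0
        · exact Or.inl h0
        · exact Or.inr (h h0).symm

-- ---- one automaton step computes φ of the extended text ----
lemma kmpStep_phi (t x : List String) (c : String) (fail : List Nat)
    (Hfail : ∀ j, 1 ≤ j → j < t.length → fail.getD j 0 = bspec t j)
    (hlt : phi t x < t.length) :
    (if c = t.getD (tblShift t fail c (phi t x) (phi t x)) "" then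
        tblShift t fail c (phi t x) (phi t x) + 1
     else tblShift t fail c (phi t x) (phi t x)) = phi t (x ++ [c]) := by
  have hinv : ∀ j, j < t.length → t.take j <:+ x → t.getD j "" = c → j ≤ phi t x :=
    fun j hj hjsuf _ => le_phi t x j (by omega) hjsuf
  obtain ⟨hr1, hr2, hr3, hr4⟩ := tblShift_spec t x c fail t.length (le_refl _) Hfail
    (phi t x) (phi t x) (le_refl _) hlt (phi_suffix t x) hinv
  set r := tblShift t fail c (phi t x) (phi t x) with hrdef
  by_cases hc : c = t.getD r ""
  · rw [if_pos hc]
    refine le_antisymm ?_ ?_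
    · refine le_phi t (x ++ [c]) (r + 1) (by omega) ?_
      rw [take_concat_getD t r hr1, ← hc]
      exact (suffix_concat_concat _ _ _ _).mpr ⟨rfl, hr2⟩
    · rcases Nat.eq_zero_or_pos (phi t (x ++ [c])) with h0 | h0
      · omega
      · obtain ⟨hc', hsuf'⟩ := phi_decompose t x c (phi t (x ++ [c])) h0
          (phi_le t (x ++ [c])) (phi_suffix t (x ++ [c]))
        have := hr3 (phi t (x ++ [c]) - 1) (by have := phi_le t (x ++ [c]); omega) hsuf' hc'
        omega
  · rw [if_neg hc]
    have hr0 : r = 0 := by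
      rcases hr4 with h | h
      · exact h
      · exact absurd h.symm hc
    rw [hr0]
    by_contra hne
    have h0 : 0 < phi t (x ++ [c]) := by omega
    obtain ⟨hc', hsuf'⟩ := phi_decompose t x c (phi t (x ++ [c])) h0
      (phi_le t (x ++ [c])) (phi_suffix t (x ++ [c]))
    have hle := hr3 (phi t (x ++ [c]) - 1) (by have := phi_le t (x ++ [c]); omega) hsuf' hc'
    rw [hr0] at hle
    have hp1 : phi t (x ++ [c]) = 1 := by omega
    rw [hp1] at hc'
    simp at hc'
    rw [hr0] at hc
    exact hc hc'.symm

-- ---- one build step extends the failure table by the next longest proper border ----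
lemma bspec_succ (t : List String) (q : Nat) (fail : List Nat) (hq1 : 1 ≤ q) (hqm : q < t.length)
    (Hfail : ∀ j, 1 ≤ j → j < q → fail.getD j 0 = bspec t j) :
    (if t.getD q "" = t.getD (tblShift t fail (t.getD q "") (bspec t q) (bspec t q)) "" then
        tblShift t fail (t.getD q "") (bspec t q) (bspec t q) + 1
     else tblShift t fail (t.getD q "") (bspec t q) (bspec t q)) = bspec t (q + 1) := by
  set c := t.getD q "" with hcdef
  have hinv : ∀ j, j < q → t.take j <:+ t.take q → t.getD j "" = c → j ≤ bspec t q :=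
    fun j hj hjsuf _ => bspec_greatest t q j hj hjsuf
  have hkq : bspec t q < q := by have := bspec_le t q; omega
  obtain ⟨hr1, hr2, hr3, hr4⟩ := tblShift_spec t (t.take q) c fail q (by omega) Hfail
    (bspec t q) (bspec t q) (le_refl _) hkq (bspec_suffix t q) hinv
  set r := tblShift t fail c (bspec t q) (bspec t q) with hrdef
  have htq1 : t.take (q + 1) = t.take q ++ [c] := take_concat_getD t q hqm
  by_cases hc : c = t.getD r ""
  · rw [if_pos hc]
    refine le_antisymm ?_ ?_
    · refine bspec_greatest t (q + 1) (r + 1) (by omega) ?_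
      rw [take_concat_getD t r (by omega), ← hc, htq1]
      exact (suffix_concat_concat _ _ _ _).mpr ⟨rfl, hr2⟩
    · rcases Nat.eq_zero_or_pos (bspec t (q + 1)) with h0 | h0
      · omega
      · have hble : bspec t (q + 1) ≤ q := by have := bspec_le t (q + 1); omega
        obtain ⟨hc', hsuf'⟩ := phi_decompose t (t.take q) c (bspec t (q + 1)) h0
          (by omega) (by rw [← htq1]; exact bspec_suffix t (q + 1))
        have := hr3 (bspec t (q + 1) - 1) (by omega) hsuf' hc'
        omega
  · rw [if_neg hc]
    have hr0 : r = 0 := by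
      rcases hr4 with h | h
      · exact h
      · exact absurd h.symm hc
    rw [hr0]
    by_contra hne
    have h0 : 0 < bspec t (q + 1) := by omega
    have hble : bspec t (q + 1) ≤ q := by have := bspec_le t (q + 1); omega
    obtain ⟨hc', hsuf'⟩ := phi_decompose t (t.take q) c (bspec t (q + 1)) h0
      (by omega) (by rw [← htq1]; exact bspec_suffix t (q + 1))
    have hle := hr3 (bspec t (q + 1) - 1) (by omega) hsuf' hc'
    rw [hr0] at hle
    have hp1 : bspec t (q + 1) = 1 := by omega
    rw [hp1] at hc'
    simp at hc'
    rw [hr0] at hc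
    exact hc hc'.symm

-- ---- the whole failure table is the longest-proper-border table ----
lemma kmpFail_build (t : List String) :
    ∀ Q : Nat, Q + 1 ≤ t.length →
    (PySem.List.pyRange 1 ((Q : Int) + 1) 1).foldl (kmpBuildStep t) ([0, 0], 0)
      = ((List.range (Q + 2)).map (bspec t), bspec t (Q + 1)) := by
  intro Q
  induction Q with
  | zero =>
    intro _
    rw [show ((0 : Nat) : Int) + 1 = 1 from by omega, PySem.List.pyRange_one_eq_nil (le_refl _)]
    simp only [List.foldl_nil]
    have h0 : bspec t 0 = 0 := Nat.findGreatest_zero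
    have h1 : bspec t 1 = 0 := Nat.findGreatest_zero
    rw [show (0 : Nat) + 2 = 2 from rfl]
    rw [show List.range 2 = [0, 1] from by simp [List.range_succ]]
    simp [h0, h1]
  | succ Q ih =>
    intro hQ
    have hcast : ((Q + 1 : Nat) : Int) + 1 = ((Q : Int) + 1) + 1 := by push_cast; ring
    rw [hcast, PySem.List.pyRange_one_succ_right (by omega), List.foldl_append,
      ih (by omega), List.foldl_cons, List.foldl_nil]
    set fail := (List.range (Q + 2)).map (bspec t) with hfdef
    have Hfail : ∀ j, 1 ≤ j → j < Q + 1 → fail.getD j 0 = bspec t j := by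
      intro j _ hj
      exact PySem.List.getD_map_range (bspec t) (Q + 2) j 0 (by omega)
    have hget : PySem.List.pyGetD t ((Q : Int) + 1) "" = t.getD (Q + 1) "" := by
      rw [show (Q : Int) + 1 = ((Q + 1 : Nat) : Int) from by push_cast; ring,
        PySem.List.pyGetD_natCast]
    rw [kmpBuildStep]
    simp only [hget]
    have hstep := bspec_succ t (Q + 1) fail (by omega) (by omega) Hfail
    rw [hstep]
    rw [show Q + 1 + 2 = (Q + 2) + 1 from by omega, List.range_succ, List.map_append]
    rfl

lemma kmpFail_getD (t : List String) (ht : t ≠ []) :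
    ∀ j, 1 ≤ j → j < t.length → (kmpFail t).getD j 0 = bspec t j := by
  intro j h1 hj
  have hm : 1 ≤ t.length := by cases t <;> simp_all
  have hbuild := kmpFail_build t (t.length - 1) (by omega)
  rw [kmpFail, show (t.length : Int) = ((t.length - 1 : Nat) : Int) + 1 from by push_cast [hm]; omega,
    hbuild]
  exact PySem.List.getD_map_range (bspec t) (t.length - 1 + 2) j 0 (by omega)

-- ---- the scan loop finds the first position where φ reaches m ----
lemma kmpLoop_eq_find? (t : List String) (ht : t ≠ []) (fail : List Nat)
    (Hfail : ∀ j, 1 ≤ j → j < t.length → fail.getD j 0 = bspec t j) :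
    ∀ (src x : List String), (∀ p, p ≤ x.length → ¬ t <:+ x.take p) →
    kmpLoop t fail t.length src x.length (phi t x) =
      ((List.range src.length).find?
          (fun j => decide (t <:+ (x ++ src).take (x.length + j + 1)))).map
        (fun j => x.length + j + 1 - t.length) := by
  intro src
  induction src with
  | nil => intro x _; simp [kmpLoop]
  | cons tok rest ih =>
    intro x hx
    have hlt : phi t x < t.length := by
      refine phi_lt_of_not_suffix t x ht ?_
      have := hx x.length (le_refl _)
      rwa [List.take_length] at this
    have hstep := kmpStep_phi t x tok fail Hfail hlt
    simp only [kmpLoop]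
    rw [hstep]
    have htake0 : (x ++ tok :: rest).take (x.length + 0 + 1) = x ++ [tok] := by
      rw [show x.length + 0 + 1 = (x ++ [tok]).length from by simp,
        show x ++ tok :: rest = (x ++ [tok]) ++ rest from by simp,
        List.take_append_of_le_length (le_refl _), List.take_length]
    have hsucc : t <:+ x ++ [tok] ↔ phi t (x ++ [tok]) = t.length := by
      constructor
      · intro h
        have := le_phi t (x ++ [tok]) t.length (le_refl _) (by rwa [List.take_length])
        have := phi_le t (x ++ [tok])
        omega
      · intro h
        have := phi_suffix t (x ++ [tok])
        rwa [h, List.take_length] at this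
    simp only [List.length_cons]
    rw [List.range_succ_eq_map, List.find?_cons]
    by_cases hm : phi t (x ++ [tok]) = t.length
    · rw [if_pos hm]
      have hcond : decide (t <:+ (x ++ tok :: rest).take (x.length + 0 + 1)) = true := by
        rw [htake0]; exact decide_eq_true (hsucc.mpr hm)
      rw [hcond]
      simp
    · rw [if_neg hm]
      have hcond : decide (t <:+ (x ++ tok :: rest).take (x.length + 0 + 1)) = false := by
        rw [htake0]; exact decide_eq_false (fun h => hm (hsucc.mp h))
      rw [hcond]
      have hx' : ∀ p, p ≤ (x ++ [tok]).length → ¬ t <:+ (x ++ [tok]).take p := by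
        intro p hp
        rcases Nat.lt_or_ge p (x.length + 1) with h1 | h1
        · rw [List.take_append_of_le_length (by omega)]
          exact hx p (by omega)
        · have hp' : p = (x ++ [tok]).length := by simp at hp ⊢; omega
          rw [hp', List.take_length]
          exact fun h => hm (hsucc.mp h)
      have hih := ih (x ++ [tok]) hx'
      rw [show (x ++ [tok]).length = x.length + 1 from by simp] at hih
      rw [List.find?_map, Option.map_map, hih]
      have hfun : (fun j => decide (t <:+ List.take (x.length + 1 + j + 1) (x ++ [tok] ++ rest)))
          = ((fun j => decide (t <:+ List.take (x.length + j + 1) (x ++ tok :: rest))) ∘ Nat.succ) := by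
        funext j
        simp only [Function.comp_apply, Nat.succ_eq_add_one]
        rw [show x ++ [tok] ++ rest = x ++ tok :: rest from by simp,
          show x.length + 1 + j + 1 = x.length + (j + 1) + 1 from by omega]
      have hfun2 : (fun j => x.length + 1 + j + 1 - t.length)
          = ((fun j => x.length + j + 1 - t.length) ∘ Nat.succ) := by
        funext j
        simp only [Function.comp_apply, Nat.succ_eq_add_one]
        omega
      rw [hfun, hfun2]

-- ---- find? over a range returns the least index satisfying the condition ----
lemma find?_range_eq_some_iff (p : Nat → Bool) (n j : Nat) :
    (List.range n).find? p = some j ↔ (j < n ∧ p j = true ∧ ∀ k, k < j → p k = false) := by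
  induction n generalizing j with
  | zero => simp
  | succ d ih =>
    rw [List.range_succ, List.find?_append]
    cases hf : (List.range d).find? p with
    | some v =>
      rw [Option.some_or]
      obtain ⟨hvd, hpv, hvmin⟩ := (ih v).mp hf
      constructor
      · intro h
        injection h with h
        subst h
        exact ⟨by omega, hpv, hvmin⟩
      · rintro ⟨hjn, hpj, hmin⟩
        have hvj : ¬ v < j := fun h => by rw [hmin v h] at hpv; exact Bool.noConfusion hpv
        have hjv : ¬ j < v := fun h => by rw [hvmin j h] at hpj; exact Bool.noConfusion hpj
        have : v = j := by omega
        rw [this]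
    | none =>
      have hnone : ∀ k, k < d → p k = false := by
        intro k hk
        have := List.find?_eq_none.mp hf k (List.mem_range.mpr hk)
        simpa using this
      simp only [Option.none_or]
      constructor
      · intro h
        rcases List.find?_eq_some_iff_append.mp h with ⟨hpj, _⟩
        have hjd : j = d := by
          have := List.mem_singleton.mp (List.mem_of_find?_eq_some h)
          exact this
        exact ⟨by omega, hpj, by rw [hjd]; exact hnone⟩
      · rintro ⟨hjn, hpj, _⟩
        have hjd : j = d := by
          by_contra hne
          have : j < d := by omega
          rw [hnone j this] at hpj
          cases hpj
        rw [hjd] at hpj ⊢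
        simp [hpj]

-- ---- ends of matches ↔ starts of matches ----
lemma end_start (t src : List String) (i : Nat) (h : i + t.length ≤ src.length) :
    ((src.drop i).take t.length = t) ↔ t <:+ src.take (i + t.length) := by
  rw [List.take_add]
  constructor
  · intro hEq; rw [hEq]; exact List.suffix_append _ _
  · intro hsuf
    have hlenX : ((src.drop i).take t.length).length = t.length := by
      rw [List.length_take, List.length_drop]; omega
    have hX : (src.drop i).take t.length <:+ src.take i ++ (src.drop i).take t.length :=
      List.suffix_append _ _
    have := List.suffix_of_suffix_length_le hsuf hX (by omega)
    exact (List.IsSuffix.eq_of_length this (by omega)).symm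

lemma startcond_bound (t src : List String) (i : Nat) (hi : i < src.length)
    (h : (src.drop i).take t.length = t) : i + t.length ≤ src.length := by
  have := congrArg List.length h
  rw [List.length_take, List.length_drop] at this
  omega

-- ---- first end position ↦ first start position ----
lemma ends_to_starts (t src : List String) (ht : t ≠ []) :
    (((List.range src.length).find? (fun j => decide (t <:+ src.take (j + 1)))).map
        (fun j => j + 1 - t.length)) =
      (List.range src.length).find? (fun i => decide ((src.drop i).take t.length = t)) := by
  have hm1 : 1 ≤ t.length := by cases t <;> simp_all
  cases hE : (List.range src.length).find? (fun j => decide (t <:+ src.take (j + 1))) with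
  | none =>
    have hnone := List.find?_eq_none.mp hE
    rw [Option.map_none]
    symm
    rw [List.find?_eq_none]
    intro i hi
    simp only [decide_eq_true_eq]
    intro hmatch
    have hiN := List.mem_range.mp hi
    have hb := startcond_bound t src i hiN hmatch
    have hend := (end_start t src i hb).mp hmatch
    have hj : i + t.length - 1 ∈ List.range src.length := List.mem_range.mpr (by omega)
    have := hnone _ hj
    simp only [decide_eq_true_eq] at this
    exact this (by rw [show i + t.length - 1 + 1 = i + t.length from by omega]; exact hend)
  | some j =>
    obtain ⟨hjn, hpj, hmin⟩ := (find?_range_eq_some_iff _ _ _).mp hE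
    simp only [decide_eq_true_eq] at hpj
    have hmj : t.length ≤ j + 1 := by
      have := hpj.length_le
      rw [List.length_take] at this
      omega
    have hstart : (src.drop (j + 1 - t.length)).take t.length = t := by
      refine (end_start t src (j + 1 - t.length) (by omega)).mpr ?_
      rwa [show j + 1 - t.length + t.length = j + 1 from by omega]
    rw [Option.map_some]
    symm
    rw [find?_range_eq_some_iff]
    refine ⟨by omega, by simpa using hstart, ?_⟩
    intro k hk
    simp only [decide_eq_false_iff_not]
    intro hmatch
    have hb : k + t.length ≤ src.length := by
      have := congrArg List.length hmatch
      rw [List.length_take, List.length_drop] at this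
      omega
    have hend := (end_start t src k hb).mp hmatch
    have hlt : k + t.length - 1 < j := by omega
    have := hmin _ hlt
    simp only [decide_eq_false_iff_not] at this
    exact this (by rw [show k + t.length - 1 + 1 = k + t.length from by omega]; exact hend)

-- ---- A's naive scan is find? over starts ----
lemma scanA_eq_find? (s t : List String) :
    ∀ l : List Nat,
      findHeadScanA s t (l.map (fun k => ((k : Nat) : Int))) =
        (l.find? (fun i => decide ((s.drop i).take t.length = t))).map (fun i => ((i : Nat) : Int)) := by
  intro l
  induction l with
  | nil => rfl
  | cons a rest ih =>
    simp only [List.map_cons, findHeadScanA]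
    have hsl : PySem.List.slice s (some ((a : Nat) : Int)) (some (((a : Nat) : Int) + PySem.List.len t))
        = (s.drop a).take t.length := by
      rw [PySem.List.len_eq, PySem.List.slice_natCast_add]
    by_cases hc : (s.drop a).take t.length = t
    · rw [if_pos (by rw [hsl]; exact hc), List.find?_cons_of_pos (by simpa using hc)]
      rfl
    · rw [if_neg (by rw [hsl]; exact hc), List.find?_cons_of_neg (by simpa using hc), ih]

-- ---- reused fuzzy-path lemmas (character-hit mapping) ----
lemma foldB_pos_const (idx : Int) : ∀ (src : List String) (cc p : Int), idx < cc →
    (src.foldl (fun (p : Int × Int) t =>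
        let total := p.1 + PySem.Str.len (PySem.Str.replace t "##" "")
        (total, if total ≤ idx then p.2 + 1 else p.2)) (cc, p)).2 = p := by
  intro src
  induction src with
  | nil => intro cc p h; rfl
  | cons tok rest ih =>
    intro cc p h
    have hg : 0 ≤ PySem.Str.len (PySem.Str.replace tok "##" "") := by
      rw [PySem.Str.len_eq]; positivity
    simp only [List.foldl_cons]
    rw [if_neg (by omega)]
    exact ih _ _ (by omega)

lemma foldB_pos_ge (idx : Int) : ∀ (src : List String) (cc p : Int),
    p ≤ (src.foldl (fun (p : Int × Int) t =>
        let total := p.1 + PySem.Str.len (PySem.Str.replace t "##" "")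
        (total, if total ≤ idx then p.2 + 1 else p.2)) (cc, p)).2 := by
  intro src
  induction src with
  | nil => intro cc p; exact le_refl _
  | cons tok rest ih =>
    intro cc p
    simp only [List.foldl_cons]
    split
    · exact le_trans (by omega) (ih _ (p + 1))
    · exact ih _ p

-- A's early-return scan = B's count of cumulative lengths ≤ idx
lemma charscan_eq (idx : Int) : ∀ (src : List String) (ti : Nat) (cc : Int),
    findHeadCharScanA idx src ti cc =
      (let r := src.foldl (fun (p : Int × Int) t =>
          let total := p.1 + PySem.Str.len (PySem.Str.replace t "##" "")
          (total, if total ≤ idx then p.2 + 1 else p.2)) (cc, (ti : Int))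
       if r.2 < (ti : Int) + (src.length : Int) then r.2 else -1) := by
  intro src
  induction src with
  | nil => intro ti cc; simp [findHeadCharScanA]
  | cons tok rest ih =>
    intro ti cc
    have hg : 0 ≤ PySem.Str.len (PySem.Str.replace tok "##" "") := by
      rw [PySem.Str.len_eq]; positivity
    simp only [findHeadCharScanA, List.foldl_cons]
    by_cases hcase : cc + PySem.Str.len (PySem.Str.replace tok "##" "") > idx
    · rw [if_pos hcase]
      have h2 : (if cc + PySem.Str.len (PySem.Str.replace tok "##" "") ≤ idx
          then (ti : Int) + 1 else (ti : Int)) = (ti : Int) := if_neg (by omega)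
      rw [h2, foldB_pos_const idx rest _ _ (by omega)]
      rw [if_pos (by push_cast [List.length_cons]; omega)]
    · rw [if_neg hcase]
      have h2 : (if cc + PySem.Str.len (PySem.Str.replace tok "##" "") ≤ idx
          then (ti : Int) + 1 else (ti : Int)) = (ti : Int) + 1 := if_pos (by omega)
      rw [h2]
      have := ih (ti + 1) (cc + PySem.Str.len (PySem.Str.replace tok "##" ""))
      simp only [Nat.cast_add, Nat.cast_one] at this
      rw [this]
      have harith : (ti : Int) + 1 + (rest.length : Int) = (ti : Int) + ((tok :: rest).length : Int) := by
        push_cast [List.length_cons]; ring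
      rw [harith]

lemma fuzzy_eq (source target : List String) :
    (if PySem.Str.find (PySem.Str.replace (PySem.Str.join "" source) "##" "")
          (PySem.Str.replace (PySem.Str.join "" target) "##" "") ≠ -1
     then findHeadCharScanA (PySem.Str.find (PySem.Str.replace (PySem.Str.join "" source) "##" "")
          (PySem.Str.replace (PySem.Str.join "" target) "##" "")) source 0 0
     else -1)
    = (if PySem.Str.find (PySem.Str.replace (PySem.Str.join "" source) "##" "")
          (PySem.Str.replace (PySem.Str.join "" target) "##" "") = -1 then -1
       else
         if (source.foldl (fun (p : Int × Int) t =>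
              (p.1 + PySem.Str.len (PySem.Str.replace t "##" ""),
                if p.1 + PySem.Str.len (PySem.Str.replace t "##" "") ≤
                    PySem.Str.find (PySem.Str.replace (PySem.Str.join "" source) "##" "")
                      (PySem.Str.replace (PySem.Str.join "" target) "##" "")
                then p.2 + 1 else p.2)) (0, 0)).2 < PySem.List.len source
         then (source.foldl (fun (p : Int × Int) t =>
              (p.1 + PySem.Str.len (PySem.Str.replace t "##" ""),
                if p.1 + PySem.Str.len (PySem.Str.replace t "##" "") ≤
                    PySem.Str.find (PySem.Str.replace (PySem.Str.join "" source) "##" "")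
                      (PySem.Str.replace (PySem.Str.join "" target) "##" "")
                then p.2 + 1 else p.2)) (0, 0)).2
         else -1) := by
  set idx := PySem.Str.find (PySem.Str.replace (PySem.Str.join "" source) "##" "")
      (PySem.Str.replace (PySem.Str.join "" target) "##" "") with hidxdef
  by_cases hidx : idx = -1
  · rw [if_neg (by simp [hidx]), if_pos hidx]
  · rw [if_pos hidx, if_neg hidx]
    have hc := charscan_eq idx source 0 0
    simp only [Nat.cast_zero, zero_add] at hc
    rw [hc, PySem.List.len_eq]

-- ---- the two search routines agree ----
lemma find_eq (source target : List String) :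
    find_head_idx source target = altFindStart source target := by
  by_cases ht : target.length = 0
  · rw [find_head_idx, altFindStart, if_pos (by simp [PySem.List.len_eq, ht]), if_pos ht]
  · have htne : target ≠ [] := by
      intro h; rw [h] at ht; exact ht rfl
    rw [find_head_idx, altFindStart,
      if_neg (by simp [PySem.List.len_eq]; omega), if_neg ht]
    have hA : findHeadScanA source target (PySem.List.pyRange 0 (PySem.List.len source) 1)
        = ((List.range source.length).find?
            (fun i => decide ((source.drop i).take target.length = target))).map
          (fun i => ((i : Nat) : Int)) := by
      rw [PySem.List.len_eq, PySem.List.pyRange_one]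
      rw [show ((source.length : Int) - 0).toNat = source.length from by omega]
      rw [show (fun k : Nat => (0 : Int) + (k : Int)) = (fun k : Nat => ((k : Nat) : Int)) from by
        funext k; omega]
      exact scanA_eq_find? source target (List.range source.length)
    have hB : kmpLoop target (kmpFail target) target.length source 0 0
        = (List.range source.length).find?
            (fun i => decide ((source.drop i).take target.length = target)) := by
      have h1 := kmpLoop_eq_find? target htne (kmpFail target) (kmpFail_getD target htne) source [] (by
        intro p hp
        simp at hp
        rw [hp]
        simp [List.suffix_nil]
        exact htne)
      rw [phi_nil target htne] at h1
      simp only [List.length_nil, List.nil_append, Nat.zero_add] at h1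
      rw [h1]
      exact ends_to_starts target source htne
    rw [hA, hB]
    cases hF : (List.range source.length).find?
        (fun i => decide ((source.drop i).take target.length = target)) with
    | some i => rfl
    | none => exact fuzzy_eq source target

lemma fuzzyB_cases (source target : List String) :
    (if PySem.Str.find (PySem.Str.replace (PySem.Str.join "" source) "##" "")
          (PySem.Str.replace (PySem.Str.join "" target) "##" "") = -1 then (-1 : Int)
       else
         if (source.foldl (fun (p : Int × Int) t =>
              (p.1 + PySem.Str.len (PySem.Str.replace t "##" ""),
                if p.1 + PySem.Str.len (PySem.Str.replace t "##" "") ≤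
                    PySem.Str.find (PySem.Str.replace (PySem.Str.join "" source) "##" "")
                      (PySem.Str.replace (PySem.Str.join "" target) "##" "")
                then p.2 + 1 else p.2)) (0, 0)).2 < PySem.List.len source
         then (source.foldl (fun (p : Int × Int) t =>
              (p.1 + PySem.Str.len (PySem.Str.replace t "##" ""),
                if p.1 + PySem.Str.len (PySem.Str.replace t "##" "") ≤
                    PySem.Str.find (PySem.Str.replace (PySem.Str.join "" source) "##" "")
                      (PySem.Str.replace (PySem.Str.join "" target) "##" "")
                then p.2 + 1 else p.2)) (0, 0)).2
         else -1) = -1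
    ∨ 0 ≤ (if PySem.Str.find (PySem.Str.replace (PySem.Str.join "" source) "##" "")
          (PySem.Str.replace (PySem.Str.join "" target) "##" "") = -1 then (-1 : Int)
       else
         if (source.foldl (fun (p : Int × Int) t =>
              (p.1 + PySem.Str.len (PySem.Str.replace t "##" ""),
                if p.1 + PySem.Str.len (PySem.Str.replace t "##" "") ≤
                    PySem.Str.find (PySem.Str.replace (PySem.Str.join "" source) "##" "")
                      (PySem.Str.replace (PySem.Str.join "" target) "##" "")
                then p.2 + 1 else p.2)) (0, 0)).2 < PySem.List.len source
         then (source.foldl (fun (p : Int × Int) t =>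
              (p.1 + PySem.Str.len (PySem.Str.replace t "##" ""),
                if p.1 + PySem.Str.len (PySem.Str.replace t "##" "") ≤
                    PySem.Str.find (PySem.Str.replace (PySem.Str.join "" source) "##" "")
                      (PySem.Str.replace (PySem.Str.join "" target) "##" "")
                then p.2 + 1 else p.2)) (0, 0)).2
         else -1) := by
  set idx := PySem.Str.find (PySem.Str.replace (PySem.Str.join "" source) "##" "")
      (PySem.Str.replace (PySem.Str.join "" target) "##" "") with hidxdef
  by_cases hidx : idx = -1
  · left; rw [if_pos hidx]
  · rw [if_neg hidx]
    by_cases hr : (source.foldl (fun (p : Int × Int) t =>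
              (p.1 + PySem.Str.len (PySem.Str.replace t "##" ""),
                if p.1 + PySem.Str.len (PySem.Str.replace t "##" "") ≤ idx
                then p.2 + 1 else p.2)) (0, 0)).2 < PySem.List.len source
    · right; rw [if_pos hr]; exact foldB_pos_ge idx source 0 0
    · left; rw [if_neg hr]

lemma altFindStart_cases (source target : List String) :
    altFindStart source target = -1 ∨ 0 ≤ altFindStart source target := by
  rw [altFindStart]
  by_cases ht : target.length = 0
  · rw [if_pos ht]; exact Or.inl rfl
  · rw [if_neg ht]
    cases h2 : kmpLoop target (kmpFail target) target.length source 0 0 with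
    | some j => exact Or.inr (Int.natCast_nonneg j)
    | none => exact fuzzyB_cases source target

lemma altFindStart_nonneg (source target : List String) (h : altFindStart source target ≠ -1) :
    0 ≤ altFindStart source target :=
  (altFindStart_cases source target).resolve_left h

lemma altFindStart_of_len_zero (source target : List String) (h : target.length = 0) :
    altFindStart source target = -1 := by
  simp [altFindStart, h]

-- setting a run of consecutive indices is a splice
lemma set_range_splice (v : String) : ∀ (m : Nat) (b : List String) (s : Nat), s + m ≤ b.length →
    (List.range m).foldl (fun bb j => bb.set (s + j) v) b
      = b.take s ++ List.replicate m v ++ b.drop (s + m) := by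
  intro m
  induction m with
  | zero => intro b s h; simp
  | succ k ih =>
    intro b s h
    rw [List.range_succ, List.foldl_append, ih b s (by omega), List.foldl_cons, List.foldl_nil]
    have hlt : s + k < b.length := by omega
    have htk : (b.take s).length = s := by simp; omega
    have hrep : (List.replicate k v).length = k := List.length_replicate
    rw [List.drop_eq_getElem_cons hlt]
    have hlen2 : (List.take s b ++ List.replicate k v).length = s + k := by
      simp [htk, hrep]
    rw [List.set_append_right (s + k) v (by omega)]
    rw [hlen2, show s + k - (s + k) = 0 from by omega, List.set_cons_zero]
    rw [List.replicate_succ' (n := k), show s + (k + 1) = s + k + 1 from by omega]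
    simp [List.append_assoc]

-- ===== VERDICT (by name: the statement is the Claim_ definition above) =====
theorem mark_entity_spec : Claim_equal_mark_entity := by
  intro bio_tags entity_tokens all_tokens entity_type _
  unfold Spec_mark_entity
  rw [mark_entity, mark_entity_alt, find_eq]
  simp only [PySem.List.len_eq]
  by_cases h1 : altFindStart all_tokens entity_tokens = -1
  · rw [if_neg (not_not_intro h1), if_neg (fun hc => hc.1 h1)]
  · have h0 := altFindStart_nonneg _ _ h1
    have hmz : entity_tokens.length ≠ 0 := by
      intro hz; exact h1 (altFindStart_of_len_zero _ _ hz)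
    obtain ⟨s', hs'⟩ : ∃ s' : Nat, altFindStart all_tokens entity_tokens = (s' : Int) :=
      ⟨_, (Int.toNat_of_nonneg h0).symm⟩
    rw [hs']
    rw [if_pos (by rw [← hs']; exact h1)]
    by_cases h2 : (s' : Int) + (entity_tokens.length : Int) ≤ (bio_tags.length : Int)
    · rw [if_pos h2, if_pos ⟨by rw [← hs']; exact h1, h2⟩]
      have hsm : s' + entity_tokens.length ≤ bio_tags.length := by omega
      -- convert A's pySetD / pyRange loop into the splice
      rw [show PySem.List.pySetD bio_tags (s' : Int) ("B-" ++ entity_type)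
            = bio_tags.set s' ("B-" ++ entity_type) from PySem.List.pySetD_natCast _ _ _]
      rw [PySem.List.pyRange_one]
      rw [show ((s' : Int) + (entity_tokens.length : Int) - ((s' : Int) + 1)).toNat
            = entity_tokens.length - 1 from by omega]
      rw [List.foldl_map]
      have hfun : (fun (bb : List String) (k : Nat) =>
            PySem.List.pySetD bb ((s' : Int) + 1 + (k : Int)) ("I-" ++ entity_type))
          = (fun (bb : List String) (k : Nat) => bb.set (s' + 1 + k) ("I-" ++ entity_type)) := by
        funext bb k
        rw [show ((s' : Int) + 1 + (k : Int)) = ((s' + 1 + k : Nat) : Int) from by push_cast; ring,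
          PySem.List.pySetD_natCast]
      rw [hfun]
      rw [set_range_splice ("I-" ++ entity_type) (entity_tokens.length - 1)
        (bio_tags.set s' ("B-" ++ entity_type)) (s' + 1) (by rw [List.length_set]; omega)]
      have hslt : s' < bio_tags.length := by omega
      have hset : bio_tags.set s' ("B-" ++ entity_type)
          = bio_tags.take s' ++ ("B-" ++ entity_type) :: bio_tags.drop (s' + 1) :=
        List.set_eq_take_cons_drop _ hslt
      have htk : (bio_tags.take s').length = s' := by rw [List.length_take]; omega
      have ht1 : (bio_tags.set s' ("B-" ++ entity_type)).take (s' + 1)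
          = bio_tags.take s' ++ [("B-" ++ entity_type)] := by
        rw [hset, List.take_append, htk, List.take_of_length_le (by omega),
          show s' + 1 - s' = 1 from by omega]
        rfl
      have ht2 : (bio_tags.set s' ("B-" ++ entity_type)).drop (s' + 1 + (entity_tokens.length - 1))
          = bio_tags.drop (s' + entity_tokens.length) := by
        rw [hset, List.drop_append, htk,
          List.drop_eq_nil_of_le (le_of_eq_of_le htk (by omega)), List.nil_append]
        rw [show s' + 1 + (entity_tokens.length - 1) - s'
              = (entity_tokens.length - 1) + 1 from by omega]
        rw [List.drop_succ_cons, List.drop_drop]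
        rw [show s' + 1 + (entity_tokens.length - 1) = s' + entity_tokens.length from by omega]
      rw [ht1, ht2, Int.toNat_natCast]
      simp [List.append_assoc]
    · rw [if_neg h2, if_neg (fun hc => h2 hc.2)]
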